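-- pv_equiv track=rewrite | github.com/Agnuxo1/p2pclaw-mcp-server | h668_bridge_attack.py | col_sums_from_ts
-- ===== SOURCE A (Python) =====
-- PATS = [(1, 1, 1, 1), (1, 1, -1, -1), (1, -1, 1, -1), (1, -1, -1, 1)]
--
-- def col_sums_from_ts(types, signs, n):
--     cs = [0, 0, 0, 0]
--     for i in range(n):
--         p = PATS[types[i]]
--         s = signs[i]
--         for k in range(4):
--             cs[k] += p[k] * s
--     return cs
-- ===== SOURCE B (Python) =====
-- PATS = [(1, 1, 1, 1), (1, 1, -1, -1), (1, -1, 1, -1), (1, -1, -1, 1)]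
--
-- def col_sums_from_ts(types, signs, n):
--     # Tally signed weight per pattern type in one pass, then combine once.
--     t = [0, 0, 0, 0]
--     for i in range(n):
--         t[types[i]] += signs[i]
--     return [sum(PATS[ty][k] * t[ty] for ty in range(4)) for k in range(4)]
-- ===== Notes on version B (the rewrite author's own statement) =====
-- stated objective: alternative
-- what changed: B replaces A's per-element update of all four output columns (nested loop over k inside the element loop) by a single tally pass accumulating one signed weight per pattern type followed by one constant-size combine over the four patterns.
import Mathlib
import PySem

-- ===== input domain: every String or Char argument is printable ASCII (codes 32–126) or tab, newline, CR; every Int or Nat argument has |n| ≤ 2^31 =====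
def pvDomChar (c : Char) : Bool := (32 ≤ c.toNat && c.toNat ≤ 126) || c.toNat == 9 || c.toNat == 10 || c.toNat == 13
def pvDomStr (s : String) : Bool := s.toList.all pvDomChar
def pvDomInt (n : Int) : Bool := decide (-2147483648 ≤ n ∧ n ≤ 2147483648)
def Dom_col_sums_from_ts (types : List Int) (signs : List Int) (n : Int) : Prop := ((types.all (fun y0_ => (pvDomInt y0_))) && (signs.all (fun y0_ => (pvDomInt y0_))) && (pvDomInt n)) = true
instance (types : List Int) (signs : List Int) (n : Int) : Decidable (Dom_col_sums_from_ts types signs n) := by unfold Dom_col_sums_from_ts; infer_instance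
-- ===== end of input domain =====

-- B replaces A's per-element update of all four output columns by a single tally per
-- pattern type followed by one constant-size combine; same return value on Pre_.

-- PATS = [(1,1,1,1),(1,1,-1,-1),(1,-1,1,-1),(1,-1,-1,1)]
def PATS : List (List Int) := [[1,1,1,1],[1,1,-1,-1],[1,-1,1,-1],[1,-1,-1,1]]

-- ===== PORT A =====
-- loop body of A: p = PATS[types[i]]; s = signs[i]; for k in range(4): cs[k] += p[k]*s
def stepA (types signs : List Int) (cs : List Int) (i : Int) : List Int :=
  let p := PySem.List.pyGetD PATS (PySem.List.pyGetD types i 0) []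
  let s := PySem.List.pyGetD signs i 0
  (PySem.List.pyRange 0 4 1).foldl (fun cs k =>
    PySem.List.pySetD cs k (PySem.List.pyGetD cs k 0 + PySem.List.pyGetD p k 0 * s)) cs

def col_sums_from_ts (types : List Int) (signs : List Int) (n : Int) : List Int :=
  (PySem.List.pyRange 0 n 1).foldl (stepA types signs) [0, 0, 0, 0]

-- ===== PORT B =====
-- loop body of B's tally pass: t[types[i]] += signs[i]
def stepB (types signs : List Int) (t : List Int) (i : Int) : List Int :=
  PySem.List.pySetD t (PySem.List.pyGetD types i 0)
    (PySem.List.pyGetD t (PySem.List.pyGetD types i 0) 0 + PySem.List.pyGetD signs i 0)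

-- B's combine: [sum(PATS[ty][k] * t[ty] for ty in range(4)) for k in range(4)]
def combine (t : List Int) : List Int :=
  (PySem.List.pyRange 0 4 1).map (fun k =>
    ((PySem.List.pyRange 0 4 1).map (fun ty =>
      PySem.List.pyGetD (PySem.List.pyGetD PATS ty []) k 0 * PySem.List.pyGetD t ty 0)).sum)

def col_sums_from_ts_alt (types : List Int) (signs : List Int) (n : Int) : List Int :=
  combine ((PySem.List.pyRange 0 n 1).foldl (stepB types signs) [0, 0, 0, 0])

-- ===== PRECONDITION & SPEC =====
-- Pre_: the first n entries of types and signs exist and each used type is a valid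
-- (possibly negative) Python index into the 4-element PATS; elsewhere A raises IndexError.
def Pre_col_sums_from_ts (types : List Int) (signs : List Int) (n : Int) : Prop :=
  n.toNat ≤ types.length ∧ n.toNat ≤ signs.length ∧
  ∀ x ∈ types.take n.toNat, -4 ≤ x ∧ x ≤ 3
instance (types : List Int) (signs : List Int) (n : Int) : Decidable (Pre_col_sums_from_ts types signs n) := by unfold Pre_col_sums_from_ts; infer_instance

def pvWitness_col_sums_from_ts : List Int × List Int × Int := ([0, -1, 2, 3], [5, -2, 7, 1], 4)

def Spec_col_sums_from_ts (types : List Int) (signs : List Int) (n : Int) (out : List Int) : Prop := out = col_sums_from_ts_alt types signs n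
instance (types : List Int) (signs : List Int) (n : Int) (out : List Int) : Decidable (Spec_col_sums_from_ts types signs n out) := by unfold Spec_col_sums_from_ts; infer_instance

-- ===== CLAIM (what is proved, stated in full; the proofs are below) =====
def Claim_equal_col_sums_from_ts : Prop := ∀ (types : List Int) (signs : List Int) (n : Int), Dom_col_sums_from_ts types signs n → Pre_col_sums_from_ts types signs n → Spec_col_sums_from_ts types signs n (col_sums_from_ts types signs n)

-- ===== LEMMAS AND PROOFS =====

theorem combine_explicit (a b c d : Int) :
    combine [a, b, c, d] = [a+b+c+d, a+b-c-d, a-b+c-d, a-b-c+d] := by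
  simp [combine, PATS, PySem.List.pyRange, PySem.List.pyGetD, PySem.List.pyGet?,
    PySem.List.pyIdx?, List.range_succ]
  exact ⟨by ring, by ring, by ring, by ring⟩

-- one element processed: A's column update on combined state = combine of B's tally update
theorem step_comm (types signs : List Int) (a b c d : Int) (i : Int)
    (h4 : -4 ≤ PySem.List.pyGetD types i 0) (h3 : PySem.List.pyGetD types i 0 ≤ 3) :
    stepA types signs (combine [a, b, c, d]) i
      = combine (stepB types signs [a, b, c, d] i) := by
  rw [combine_explicit]
  have h8 : PySem.List.pyGetD types i 0 = -4 ∨ PySem.List.pyGetD types i 0 = -3 ∨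
      PySem.List.pyGetD types i 0 = -2 ∨ PySem.List.pyGetD types i 0 = -1 ∨
      PySem.List.pyGetD types i 0 = 0 ∨ PySem.List.pyGetD types i 0 = 1 ∨
      PySem.List.pyGetD types i 0 = 2 ∨ PySem.List.pyGetD types i 0 = 3 := by omega
  rcases h8 with h | h | h | h | h | h | h | h <;>
    · simp only [stepA, stepB, h]
      simp [PATS, combine, PySem.List.pyRange, PySem.List.pyGetD, PySem.List.pySetD,
        PySem.List.pyGet?, PySem.List.pySet?, PySem.List.pyIdx?, List.range_succ]
      exact ⟨by ring, by ring, by ring, by ring⟩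

theorem exists_four (t : List Int) (h : t.length = 4) :
    ∃ a b c d : Int, t = [a, b, c, d] := by
  match t, h with
  | [a, b, c, d], _ => exact ⟨a, b, c, d, rfl⟩

theorem stepB_length (types signs : List Int) (t : List Int) (i : Int) :
    (stepB types signs t i).length = t.length := by
  simp only [stepB, PySem.List.pySetD, PySem.List.pySet?]
  cases PySem.List.pyIdx? t.length (PySem.List.pyGetD types i 0) <;> simp

-- main loop invariant over the first m iterations
theorem inv_lemma (types signs : List Int) (m : Nat)
    (h : ∀ i : Nat, i < m → -4 ≤ PySem.List.pyGetD types (i : Int) 0 ∧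
          PySem.List.pyGetD types (i : Int) 0 ≤ 3) :
    ∃ a b c d : Int,
      (PySem.List.pyRange 0 (m : Int) 1).foldl (stepB types signs) [0, 0, 0, 0] = [a, b, c, d] ∧
      (PySem.List.pyRange 0 (m : Int) 1).foldl (stepA types signs) [0, 0, 0, 0]
        = combine [a, b, c, d] := by
  induction m with
  | zero =>
    refine ⟨0, 0, 0, 0, by simp, ?_⟩
    rw [combine_explicit]; simp
  | succ m ih =>
    obtain ⟨a, b, c, d, hB, hA⟩ := ih (fun i hi => h i (Nat.lt_succ_of_lt hi))
    have hsplit : PySem.List.pyRange 0 ((m + 1 : Nat) : Int) 1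
        = PySem.List.pyRange 0 (m : Int) 1 ++ [(m : Int)] := by
      rw [show ((m + 1 : Nat) : Int) = (m : Int) + 1 by push_cast; ring]
      exact PySem.List.pyRange_one_succ_right (by positivity)
    obtain ⟨hm1, hm2⟩ := h m (Nat.lt_succ_self m)
    obtain ⟨a', b', c', d', hnew⟩ := exists_four (stepB types signs [a, b, c, d] (m : Int))
      (by rw [stepB_length]; rfl)
    refine ⟨a', b', c', d', ?_, ?_⟩
    · rw [hsplit, List.foldl_append, hB, List.foldl_cons, List.foldl_nil, hnew]
    · rw [hsplit, List.foldl_append, hA, List.foldl_cons, List.foldl_nil,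
        step_comm types signs a b c d (m : Int) hm1 hm2, hnew]

-- ===== VERDICT (by name: the statement is the Claim_ definition above) =====
theorem col_sums_from_ts_spec : Claim_equal_col_sums_from_ts := by
  intro types signs n _hDom hPre
  obtain ⟨hlt, hls, hval⟩ := hPre
  unfold Spec_col_sums_from_ts col_sums_from_ts col_sums_from_ts_alt
  have hn : PySem.List.pyRange 0 n 1 = PySem.List.pyRange 0 (n.toNat : Int) 1 := by
    rcases (by omega : n ≤ 0 ∨ 0 < n) with h | h
    · rw [PySem.List.pyRange_one_eq_nil h, Int.toNat_of_nonpos h,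
        PySem.List.pyRange_one_eq_nil (by norm_num)]
    · rw [Int.toNat_of_nonneg h.le]
  have hcond : ∀ i : Nat, i < n.toNat → -4 ≤ PySem.List.pyGetD types (i : Int) 0 ∧
      PySem.List.pyGetD types (i : Int) 0 ≤ 3 := by
    intro i hi
    have hi' : i < types.length := lt_of_lt_of_le hi hlt
    have hg : PySem.List.pyGetD types (i : Int) 0 = types[i] := by
      rw [PySem.List.pyGetD_natCast]; exact List.getD_eq_getElem types 0 hi'
    rw [hg]
    apply hval
    have hlen : i < (types.take n.toNat).length := by
      simp [List.length_take]; omega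
    have := List.getElem_mem hlen
    rwa [List.getElem_take] at this
  obtain ⟨a, b, c, d, hB, hA⟩ := inv_lemma types signs n.toNat hcond
  rw [hn, hA, hB]
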